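-- pv_equiv track=rewrite | github.com/chayan7/flashfold | flashfold/utils/alignment.py | introduce_gap_in_subunit
-- ===== SOURCE A (Python) =====
-- from typing import List, Dict
--
-- def introduce_gap_in_subunit(subunit_seq: List[str]) -> List[List[str]]:
--     """
--     Introduce gaps in subunit sequences.
--
--     Args:
--         subunit_seq (List[str]): List of subunit sequences.
--
--     Returns:
--         List[List[str]]: List of subunit sequences with gaps introduced.
--     """
--     placeholder = "-"
--     # Generate combinations
--     combinations = []
--     for i in range(len(subunit_seq)):
--         combination = subunit_seq.copy()
--         for j in range(len(subunit_seq)):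
--             if i == j:
--                 pass
--             else:
--                 combination[j] = placeholder * len(subunit_seq[j])
--         combinations.append(combination)
--     return combinations
-- ===== SOURCE B (Python) =====
-- def introduce_gap_in_subunit(subunit_seq):
--     # Single pass with a gapped-prefix accumulator: each row is built in one
--     # concatenation prefix_gaps + [current] + gaps-of-rest; no copy-then-overwrite.
--     combinations = []
--     gapped_prefix = []
--     rest = list(subunit_seq)
--     while rest:
--         head = rest.pop(0)
--         combinations.append(gapped_prefix + [head] + ["-" * len(s) for s in rest])
--         gapped_prefix = gapped_prefix + ["-" * len(head)]
--     return combinations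
-- ===== Notes on version B (the rewrite author's own statement) =====
-- stated objective: alternative
-- what changed: B replaces A's copy-the-whole-list-then-overwrite-every-off-diagonal-cell double loop by a single left-to-right pass that maintains an accumulator of already-gapped prefix strings and emits each row in one concatenation prefix + [current] + gaps-of-rest, with no indexed in-place updates.
import Mathlib
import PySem

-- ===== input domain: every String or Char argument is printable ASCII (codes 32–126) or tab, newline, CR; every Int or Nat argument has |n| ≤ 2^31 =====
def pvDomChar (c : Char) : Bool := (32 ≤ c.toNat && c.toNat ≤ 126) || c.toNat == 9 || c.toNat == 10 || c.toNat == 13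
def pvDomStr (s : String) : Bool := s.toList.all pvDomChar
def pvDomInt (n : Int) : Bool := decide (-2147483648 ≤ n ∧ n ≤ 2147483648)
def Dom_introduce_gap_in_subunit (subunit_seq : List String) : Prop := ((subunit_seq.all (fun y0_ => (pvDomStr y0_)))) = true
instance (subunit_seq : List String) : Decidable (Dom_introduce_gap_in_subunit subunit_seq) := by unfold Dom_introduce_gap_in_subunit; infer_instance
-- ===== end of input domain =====

-- B makes a single pass carrying a gapped-prefix accumulator and emits each row in one
-- concatenation, replacing A's copy-then-overwrite index double loop; objective: alternative.

-- "-" * len(s)  (exact: repeat of a single ASCII char)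
def pvGap (s : String) : String := String.ofList (List.replicate s.toList.length '-')

-- ===== PORT A =====
def introduce_gap_in_subunit (subunit_seq : List String) : List (List String) :=
  (List.range subunit_seq.length).foldl (fun combinations i =>
    let combination := (List.range subunit_seq.length).foldl (fun comb j =>
      if i = j then comb else comb.set j (pvGap (subunit_seq.getD j ""))) subunit_seq
    combinations ++ [combination]) []

-- ===== PORT B =====
-- B's while loop: state = (combinations, gapped_prefix), consuming rest front to back
def pvAltGo (comb : List (List String)) (gp : List String) : List String → List (List String)
  | [] => comb
  | head :: rest => pvAltGo (comb ++ [gp ++ head :: rest.map pvGap]) (gp ++ [pvGap head]) rest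

def introduce_gap_in_subunit_alt (subunit_seq : List String) : List (List String) :=
  pvAltGo [] [] subunit_seq

-- ===== PRECONDITION & SPEC =====
def Spec_introduce_gap_in_subunit (subunit_seq : List String) (out : List (List String)) : Prop := out = introduce_gap_in_subunit_alt subunit_seq
instance (subunit_seq : List String) (out : List (List String)) : Decidable (Spec_introduce_gap_in_subunit subunit_seq out) := by unfold Spec_introduce_gap_in_subunit; infer_instance

-- ===== CLAIM (what is proved, stated in full; the proofs are below) =====
def Claim_equal_introduce_gap_in_subunit : Prop := ∀ (subunit_seq : List String), Dom_introduce_gap_in_subunit subunit_seq → Spec_introduce_gap_in_subunit subunit_seq (introduce_gap_in_subunit subunit_seq)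

-- ===== LEMMAS AND PROOFS =====

-- A's inner loop over range n, as a function of n
def pvInner (ss : List String) (i n : Nat) : List String :=
  (List.range n).foldl (fun comb j =>
    if i = j then comb else comb.set j (pvGap (ss.getD j ""))) ss

lemma pvInner_length (ss : List String) (i : Nat) : ∀ n, (pvInner ss i n).length = ss.length := by
  intro n
  induction n with
  | zero => rfl
  | succ n ih =>
    simp [pvInner, List.range_succ, List.foldl_append] at *
    split <;> simp [ih]

lemma pvInner_get (ss : List String) (i : Nat) :
    ∀ n k, (pvInner ss i n)[k]? =
      if k < n ∧ k ≠ i then ss[k]?.map pvGap else ss[k]? := by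
  intro n
  induction n with
  | zero => intro k; simp [pvInner]
  | succ n ih =>
    intro k
    have hlen := pvInner_length ss i n
    simp only [pvInner, List.range_succ, List.foldl_append, List.foldl_cons, List.foldl_nil]
    by_cases hin : i = n
    · rw [if_pos hin]
      rw [show ((List.range n).foldl (fun comb j =>
          if i = j then comb else comb.set j (pvGap (ss.getD j ""))) ss) = pvInner ss i n from rfl]
      rw [ih k]
      by_cases h1 : k < n ∧ k ≠ i <;> by_cases h2 : k < n + 1 ∧ k ≠ i <;> simp [h1, h2] <;> omega
    · simp only [if_neg hin]
      rw [show ((List.range n).foldl (fun comb j =>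
          if i = j then comb else comb.set j (pvGap (ss.getD j ""))) ss) = pvInner ss i n from rfl]
      rw [List.getElem?_set]
      by_cases hkn : n = k
      · subst hkn
        simp only [hlen]
        by_cases hn : n < ss.length
        · have : ss.getD n "" = ss[n] := by
            simp [List.getD_eq_getElem?_getD, List.getElem?_eq_getElem hn]
          simp [hn, Ne.symm hin]
        · have hnone : ss[n]? = none := List.getElem?_eq_none (by omega)
          simp [hn]
      · rw [if_neg hkn, ih k]
        by_cases h1 : k < n ∧ k ≠ i <;> by_cases h2 : k < n + 1 ∧ k ≠ i <;> simp [h1, h2] <;> omega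

lemma pvRow_eq (ss : List String) (i : Nat) (hi : i < ss.length) :
    pvInner ss i ss.length = (ss.map pvGap).set i ss[i] := by
  apply List.ext_getElem?
  intro k
  rw [pvInner_get, List.getElem?_set]
  by_cases hik : i = k
  · subst hik
    simp [List.length_map, hi]
  · simp only [if_neg hik, List.getElem?_map]
    by_cases h : k < ss.length ∧ k ≠ i
    · simp [h]
    · have : ¬ k < ss.length := by
        rcases not_and_or.mp h with h' | h'
        · exact h'
        · exact absurd (Ne.symm hik) (not_not.mp (by simpa using h'))
      simp [h, List.getElem?_eq_none (by omega : ss.length ≤ k)]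

lemma pvFoldl_append (f : Nat → List String) :
    ∀ (l : List Nat) (acc : List (List String)),
      l.foldl (fun c i => c ++ [f i]) acc = acc ++ l.map f := by
  intro l
  induction l with
  | nil => simp
  | cons x xs ih => intro acc; simp [ih]

-- B's recursion computes row i = (gapped rows) with the diagonal restored
lemma pvAltGo_eq (rest : List String) : ∀ (comb : List (List String)) (gp : List String),
    pvAltGo comb gp rest =
      comb ++ (List.range rest.length).map (fun i => gp ++ (rest.map pvGap).set i (rest.getD i "")) := by
  induction rest with
  | nil => intro comb gp; simp [pvAltGo]
  | cons s rest ih =>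
    intro comb gp
    rw [pvAltGo, ih]
    simp only [List.length_cons, List.range_succ_eq_map, List.map_cons, List.map_map]
    simp

lemma pvAlt_eq (ss : List String) :
    introduce_gap_in_subunit_alt ss =
      (List.range ss.length).map (fun i => (ss.map pvGap).set i (ss.getD i "")) := by
  rw [introduce_gap_in_subunit_alt, pvAltGo_eq]
  simp

theorem introduce_gap_in_subunit_eq_alt (ss : List String) :
    introduce_gap_in_subunit ss = introduce_gap_in_subunit_alt ss := by
  have hA : introduce_gap_in_subunit ss =
      (List.range ss.length).foldl (fun c i => c ++ [pvInner ss i ss.length]) [] := rfl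
  rw [hA, pvFoldl_append (fun i => pvInner ss i ss.length), pvAlt_eq]
  simp only [List.nil_append]
  apply List.map_congr_left
  intro i hi
  have hi' : i < ss.length := List.mem_range.mp hi
  rw [pvRow_eq ss i hi']
  congr 1
  simp [List.getD_eq_getElem?_getD, List.getElem?_eq_getElem hi']

-- ===== VERDICT (by name: the statement is the Claim_ definition above) =====
theorem introduce_gap_in_subunit_spec : Claim_equal_introduce_gap_in_subunit := by
  intro ss _
  exact introduce_gap_in_subunit_eq_alt ss
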